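-- pv_equiv track=rewrite | github.com/ricbit/advent-of-code | 2017/adv13-r.py | walk1
-- ===== SOURCE A (Python) =====
-- def walk1(layers):
--   m = max(layers)
--   x = [0] * (m + 1)
--   d = [1] * (m + 1)
--   ans = 0
--   for i in range(m + 1):
--     if x[i] == 0 and i in layers:
--       ans += i * layers[i]
--     for j in range(m + 1):
--       if j in layers:
--         x[j] += d[j]
--         if x[j] >= layers[j]:
--           x[j] = layers[j] - 2
--           d[j] *= -1
--         if x[j] < 0:
--           x[j] = 1
--           d[j] *= -1
--   return ans
-- ===== SOURCE B (Python) =====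
-- def walk1(layers):
--   # Closed form instead of step-by-step scanner simulation: a scanner of range r
--   # oscillates with period 2*(r-1), so depth i (checked at time i) is caught iff
--   # i % (2*(r-1)) == 0; scanners with r <= 1 only catch at time 0 and depths
--   # i <= 0 contribute 0 severity, so only i > 0, r >= 2 terms matter.
--   return sum(i * r for i, r in layers.items()
--              if i > 0 and r >= 2 and i % (2 * (r - 1)) == 0)
-- ===== Notes on version B (the rewrite author's own statement) =====
-- stated objective: faster
-- what changed: Replaces the O(m^2) tick-by-tick simulation of every scanner over all m+1 time steps by a single pass over the dict items with the closed-form periodicity check i % (2*(r-1)) == 0.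
import Mathlib
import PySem

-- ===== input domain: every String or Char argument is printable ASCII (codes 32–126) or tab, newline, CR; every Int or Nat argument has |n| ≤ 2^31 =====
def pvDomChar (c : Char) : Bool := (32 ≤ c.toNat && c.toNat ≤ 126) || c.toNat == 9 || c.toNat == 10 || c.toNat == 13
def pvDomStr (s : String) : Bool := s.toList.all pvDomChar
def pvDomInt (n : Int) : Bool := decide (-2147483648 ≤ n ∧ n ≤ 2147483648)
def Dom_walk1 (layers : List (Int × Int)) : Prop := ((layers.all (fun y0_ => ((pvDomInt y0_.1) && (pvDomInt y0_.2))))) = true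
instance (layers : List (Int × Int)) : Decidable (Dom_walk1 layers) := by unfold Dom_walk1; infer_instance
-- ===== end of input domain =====

-- B replaces A's tick-by-tick scanner simulation by a one-pass closed-form
-- periodicity check over the dict items (objective: faster).

-- ===== PORT A =====
-- one scanner step for a single layer of range r, from position x moving d:
--   x += d; if x >= r: x = r-2, d = -d; if x < 0: x = 1, d = -d
def tickA (r : Int) (xd : Int × Int) : Int × Int :=
  let x := xd.1 + xd.2
  let xd1 := if x ≥ r then (r - 2, -xd.2) else (x, xd.2)
  if xd1.1 < 0 then (1, -xd1.2) else xd1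

-- the inner 'for j in range(m+1)' loop (j ranges over 0..m, so j.toNat is exact)
def innerA (d0 : PySem.Dict Int Int) (m : Int) (s : List Int × List Int) :
    List Int × List Int :=
  (PySem.List.pyRange 0 (m + 1) 1).foldl (fun s j =>
    if d0.contains j then
      let xd := tickA (d0.getD j 0) (s.1.getD j.toNat 0, s.2.getD j.toNat 0)
      (s.1.set j.toNat xd.1, s.2.set j.toNat xd.2)
    else s) s

-- the body of the outer 'for i in range(m+1)' loop; state is (x, d, ans)
def outerA (d0 : PySem.Dict Int Int) (m : Int) (s : List Int × List Int × Int)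
    (i : Int) : List Int × List Int × Int :=
  let ans := if s.1.getD i.toNat 0 = 0 ∧ d0.contains i = true
             then s.2.2 + i * d0.getD i 0 else s.2.2
  let xd := innerA d0 m (s.1, s.2.1)
  (xd.1, xd.2, ans)

def walk1 (layers : List (Int × Int)) : Int :=
  let d0 := PySem.Dict.ofList layers
  match PySem.List.max? d0.keys (fun k => k) with
  | none => 0   -- max() of an empty dict raises ValueError in Python; excluded by Pre_walk1
  | some m =>
    -- [0] * (m+1) is the empty list when m + 1 ≤ 0, exactly like Python list repetition
    let n := (m + 1).toNat
    ((PySem.List.pyRange 0 (m + 1) 1).foldl (outerA d0 m)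
      (List.replicate n 0, List.replicate n 1, 0)).2.2

-- ===== PORT B =====
def walk1_alt (layers : List (Int × Int)) : Int :=
  ((PySem.Dict.ofList layers).items.map (fun p =>
    if 0 < p.1 ∧ 2 ≤ p.2 ∧ PySem.Int.mod p.1 (2 * (p.2 - 1)) = 0
    then p.1 * p.2 else 0)).sum

-- ===== PRECONDITION & SPEC =====
-- Pre_ excludes only the empty dict, on which A's max(layers) raises ValueError.
def Pre_walk1 (layers : List (Int × Int)) : Prop := layers ≠ []
instance (layers : List (Int × Int)) : Decidable (Pre_walk1 layers) := by
  unfold Pre_walk1; infer_instance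

def pvWitness_walk1 : (List (Int × Int)) := [(0, 3), (1, 2), (4, 4), (6, 4)]

def Spec_walk1 (layers : List (Int × Int)) (out : Int) : Prop := out = walk1_alt layers
instance (layers : List (Int × Int)) (out : Int) : Decidable (Spec_walk1 layers out) := by
  unfold Spec_walk1; infer_instance

-- ===== CLAIM (what is proved, stated in full; the proofs are below) =====
def Claim_equal_walk1 : Prop :=
  ∀ (layers : List (Int × Int)), Dom_walk1 layers → Pre_walk1 layers →
    Spec_walk1 layers (walk1 layers)

-- ===== LEMMAS AND PROOFS =====

def xf (r : Int) (t : Nat) : Int :=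
  if 2 ≤ r then
    let u : Int := (t % (2 * (r - 1)).toNat : Nat)
    if u ≤ r - 1 then u else 2 * (r - 1) - u
  else if t = 0 then 0 else 1

def df (r : Int) (t : Nat) : Int :=
  if 2 ≤ r then
    if t = 0 then 1
    else if 1 ≤ ((t % (2 * (r - 1)).toNat : Nat) : Int) ∧
              ((t % (2 * (r - 1)).toNat : Nat) : Int) ≤ r - 1 then 1 else -1
  else 1

theorem xf_zero (r : Int) : xf r 0 = 0 := by
  simp only [xf, Nat.zero_mod, Nat.cast_zero]
  split_ifs <;> omega

theorem df_zero (r : Int) : df r 0 = 1 := by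
  simp only [df]
  split_ifs <;> rfl

theorem tickA_closed (r : Int) (t : Nat) :
    tickA r (xf r t, df r t) = (xf r (t + 1), df r (t + 1)) := by
  by_cases hr : 2 ≤ r
  · have hpn : (((2 * (r - 1)).toNat : Nat) : Int) = 2 * (r - 1) :=
      Int.toNat_of_nonneg (by omega)
    have h10 : (0 + 1) % (2 * (r - 1)).toNat = 1 := by
      simpa using Nat.mod_eq_of_lt (show 1 < (2 * (r - 1)).toNat by omega)
    set pn := (2 * (r - 1)).toNat with hpndef
    have hpn2 : 2 ≤ pn := by omega
    have h1 : t % pn < pn := Nat.mod_lt _ (by omega)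
    have hs : (t + 1) % pn = (t % pn + 1) % pn := by
      conv_lhs => rw [Nat.add_mod, Nat.mod_eq_of_lt (show 1 < pn by omega)]
    rcases Nat.eq_zero_or_pos t with ht | ht
    · subst ht
      have hx1 : xf r (0 + 1) = 1 := by
        simp only [xf, if_pos hr]
        rw [← hpndef, h10, Nat.cast_one, if_pos (by omega : (1 : Int) ≤ r - 1)]
      have hd1 : df r (0 + 1) = 1 := by
        simp only [df, if_pos hr]
        rw [if_neg (by omega : ¬ (0 + 1 = 0)), ← hpndef, h10, Nat.cast_one,
          if_pos (⟨by omega, by omega⟩ : (1 : Int) ≤ 1 ∧ (1 : Int) ≤ r - 1)]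
      rw [xf_zero, df_zero, hx1, hd1]
      show tickA r (0, 1) = (1, 1)
      simp only [tickA]
      rw [if_neg (by omega : ¬ ((0 : Int) + 1 ≥ r))]
      norm_num
    · have ht0 : t ≠ 0 := by omega
      have ht1 : t + 1 ≠ 0 := by omega
      simp only [tickA, xf, df, if_pos hr, if_neg ht0, if_neg ht1]
      simp only [← hpndef]
      generalize hu : t % pn = u at h1 hs ⊢
      rcases eq_or_ne (u + 1) pn with h | h
      · have hU' : (t + 1) % pn = 0 := by rw [hs, h, Nat.mod_self]
        rw [hU']
        have hc : ((u : Nat) : Int) + 1 = 2 * (r - 1) := by omega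
        simp only [Nat.cast_zero]
        split_ifs <;> (try dsimp only at *) <;>
          (try simp only [Prod.mk.injEq, and_true]) <;> omega
      · have hU' : (t + 1) % pn = u + 1 := by
          rw [hs, Nat.mod_eq_of_lt (by omega)]
        rw [hU']
        have hc : ((u : Nat) : Int) + 1 ≠ 2 * (r - 1) := by omega
        simp only [Nat.cast_add, Nat.cast_one]
        split_ifs <;> (try dsimp only at *) <;>
          (try simp only [Prod.mk.injEq, and_true]) <;> omega
  · have hx1 : ∀ s : Nat, s ≠ 0 → xf r s = 1 := fun s hs => by
      simp only [xf, if_neg hr, if_neg hs]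
    have hd : ∀ s : Nat, df r s = 1 := fun s => by simp only [df, if_neg hr]
    rcases Nat.eq_zero_or_pos t with ht | ht
    · subst ht
      rw [xf_zero, hd, hd, hx1 (0 + 1) (by omega)]
      show tickA r (0, 1) = (1, 1)
      simp only [tickA]
      rw [if_pos (by omega : (0 : Int) + 1 ≥ r), if_pos (by omega : r - 2 < 0)]
      norm_num
    · rw [hx1 t (by omega), hd, hd, hx1 (t + 1) (by omega)]
      show tickA r (1, 1) = (1, 1)
      simp only [tickA]
      rw [if_pos (by omega : (1 : Int) + 1 ≥ r), if_pos (by omega : r - 2 < 0)]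
      norm_num

theorem xf_zero_iff (r : Int) (t : Nat) :
    xf r t = 0 ↔ ((2 ≤ r ∧ t % (2 * (r - 1)).toNat = 0) ∨ (¬ 2 ≤ r ∧ t = 0)) := by
  by_cases hr : 2 ≤ r
  · have hpn : (((2 * (r - 1)).toNat : Nat) : Int) = 2 * (r - 1) :=
      Int.toNat_of_nonneg (by omega)
    have h1 : t % (2 * (r - 1)).toNat < (2 * (r - 1)).toNat :=
      Nat.mod_lt _ (by omega)
    simp only [xf, hr, true_and, not_true, false_and, or_false]
    generalize hu : t % (2 * (r - 1)).toNat = u at h1 ⊢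
    split_ifs <;> omega
  · rw [show xf r t = if t = 0 then 0 else 1 from by simp only [xf, if_neg hr]]
    by_cases h : t = 0 <;> simp [h, hr]

theorem contrib_eq (r : Int) (t : Nat) :
    (if xf r t = 0 then (t : Int) * r else 0) =
    (if 0 < (t : Int) ∧ 2 ≤ r ∧ PySem.Int.mod (t : Int) (2 * (r - 1)) = 0
     then (t : Int) * r else 0) := by
  rcases Nat.eq_zero_or_pos t with ht | ht
  · subst ht; simp [xf_zero]
  · have ht0 : t ≠ 0 := by omega
    have hpos : (0 : Int) < (t : Int) := by exact_mod_cast ht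
    by_cases hr : 2 ≤ r
    · have hpn : (((2 * (r - 1)).toNat : Nat) : Int) = 2 * (r - 1) :=
        Int.toNat_of_nonneg (by omega)
      have hmod : PySem.Int.mod (t : Int) (2 * (r - 1)) = 0 ↔
          t % (2 * (r - 1)).toNat = 0 := by
        rw [PySem.Int.mod_eq_zero_iff_dvd]
        conv_lhs => rw [← hpn]
        rw [Int.natCast_dvd_natCast, Nat.dvd_iff_mod_eq_zero]
      have hiff : xf r t = 0 ↔
          (0 < (t : Int) ∧ 2 ≤ r ∧ PySem.Int.mod (t : Int) (2 * (r - 1)) = 0) := by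
        rw [xf_zero_iff]
        constructor
        · rintro (⟨_, hm0⟩ | ⟨hn2, _⟩)
          · exact ⟨hpos, hr, hmod.mpr hm0⟩
          · exact absurd hr hn2
        · rintro ⟨_, _, hm0⟩
          exact Or.inl ⟨hr, hmod.mp hm0⟩
      exact if_congr hiff rfl rfl
    · have hiff : xf r t = 0 ↔
          (0 < (t : Int) ∧ 2 ≤ r ∧ PySem.Int.mod (t : Int) (2 * (r - 1)) = 0) := by
        rw [xf_zero_iff]
        constructor
        · rintro (⟨h2, _⟩ | ⟨_, h0⟩)
          · exact absurd h2 hr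
          · exact absurd h0 ht0
        · rintro ⟨_, h2, _⟩
          exact absurd h2 hr
      exact if_congr hiff rfl rfl

def Xl (d0 : PySem.Dict Int Int) (n t : Nat) : List Int :=
  (List.range n).map (fun (j : Nat) => if d0.contains (j : Int) = true then xf (d0.getD (j : Int) 0) t else 0)
def Dl (d0 : PySem.Dict Int Int) (n t : Nat) : List Int :=
  (List.range n).map (fun (j : Nat) => if d0.contains (j : Int) = true then df (d0.getD (j : Int) 0) t else 1)

theorem pyRange_toNat (m : Int) :
    PySem.List.pyRange 0 (m + 1) 1 =
      List.map (fun (k : Nat) => (k : Int)) (List.range (m + 1).toNat) := by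
  by_cases h : m + 1 ≤ 0
  · rw [show (m + 1).toNat = 0 from by omega]
    simp only [List.range_zero, List.map_nil]
    simp [PySem.List.pyRange, show ¬ (0 : Int) < m + 1 from by omega]
  · conv_lhs => rw [show m + 1 = ((m + 1).toNat : Int) from by omega]
    rw [PySem.List.pyRange_zero_natCast]

-- the one-index mixed list
def mixX (d0 : PySem.Dict Int Int) (n t a : Nat) : List Int :=
  (List.range n).map (fun (j : Nat) =>
    if j < a then (if d0.contains (j : Int) = true then xf (d0.getD (j : Int) 0) (t + 1) else 0)
    else (if d0.contains (j : Int) = true then xf (d0.getD (j : Int) 0) t else 0))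
def mixD (d0 : PySem.Dict Int Int) (n t a : Nat) : List Int :=
  (List.range n).map (fun (j : Nat) =>
    if j < a then (if d0.contains (j : Int) = true then df (d0.getD (j : Int) 0) (t + 1) else 1)
    else (if d0.contains (j : Int) = true then df (d0.getD (j : Int) 0) t else 1))

theorem innerA_closed (d0 : PySem.Dict Int Int) (m : Int) (n t : Nat)
    (hn : (m + 1).toNat = n) :
    innerA d0 m (Xl d0 n t, Dl d0 n t) = (Xl d0 n (t + 1), Dl d0 n (t + 1)) := by
  unfold innerA
  rw [pyRange_toNat, hn, List.foldl_map, List.range_eq_range']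
  have key : ∀ (k a : Nat), a + k = n →
      (List.range' a k).foldl (fun s (j : Nat) =>
        if d0.contains (j : Int) then
          let xd := tickA (d0.getD (j : Int) 0)
            (s.1.getD ((j : Int)).toNat 0, s.2.getD ((j : Int)).toNat 0)
          (s.1.set ((j : Int)).toNat xd.1, s.2.set ((j : Int)).toNat xd.2)
        else s) (mixX d0 n t a, mixD d0 n t a)
      = (Xl d0 n (t + 1), Dl d0 n (t + 1)) := by
    intro k
    induction k with
    | zero =>
      intro a ha
      simp only [List.range'_zero, List.foldl_nil]
      have ha' : a = n := by omega
      subst ha'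
      simp only [Prod.mk.injEq]
      constructor
      · unfold mixX Xl
        refine List.map_congr_left ?_
        intro j hj
        rw [if_pos (List.mem_range.mp hj)]
      · unfold mixD Dl
        refine List.map_congr_left ?_
        intro j hj
        rw [if_pos (List.mem_range.mp hj)]
    | succ k ih =>
      intro a ha
      rw [List.range'_succ, List.foldl_cons]
      have haN : a < n := by omega
      have hstep :
          (if d0.contains (a : Int) then
            let xd := tickA (d0.getD (a : Int) 0)
              ((mixX d0 n t a).getD ((a : Int)).toNat 0, (mixD d0 n t a).getD ((a : Int)).toNat 0)
            ((mixX d0 n t a).set ((a : Int)).toNat xd.1, (mixD d0 n t a).set ((a : Int)).toNat xd.2)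
          else (mixX d0 n t a, mixD d0 n t a))
          = (mixX d0 n t (a + 1), mixD d0 n t (a + 1)) := by
        by_cases hc : d0.contains (a : Int) = true
        · rw [if_pos hc]
          have hgetX : (mixX d0 n t a).getD a 0 =
              xf (d0.getD (a : Int) 0) t := by
            have hl : a < (mixX d0 n t a).length := by simp [mixX]; omega
            rw [List.getD_eq_getElem _ _ hl]
            simp [mixX, hc]
          have hgetD : (mixD d0 n t a).getD a 0 =
              df (d0.getD (a : Int) 0) t := by
            have hl : a < (mixD d0 n t a).length := by simp [mixD]; omega
            rw [List.getD_eq_getElem _ _ hl]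
            simp [mixD, hc]
          simp only [Int.toNat_natCast]
          rw [hgetX, hgetD]
          simp only [tickA_closed, Prod.mk.injEq]
          constructor
          · apply List.ext_getElem (by simp [mixX])
            intro i h1 h2
            simp only [mixX, List.getElem_set, List.getElem_map, List.getElem_range]
            rcases eq_or_ne a i with rfl | hne
            · simp [hc]
            · rw [if_neg hne]
              by_cases h : i < a
              · rw [if_pos h, if_pos (show i < a + 1 by omega)]
              · rw [if_neg h, if_neg (show ¬ i < a + 1 by omega)]
          · apply List.ext_getElem (by simp [mixD])
            intro i h1 h2
            simp only [mixD, List.getElem_set, List.getElem_map, List.getElem_range]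
            rcases eq_or_ne a i with rfl | hne
            · simp [hc]
            · rw [if_neg hne]
              by_cases h : i < a
              · rw [if_pos h, if_pos (show i < a + 1 by omega)]
              · rw [if_neg h, if_neg (show ¬ i < a + 1 by omega)]
        · rw [if_neg hc]
          simp only [Prod.mk.injEq]
          constructor
          · unfold mixX
            refine List.map_congr_left ?_
            intro j hj
            rcases eq_or_ne j a with rfl | hne
            · simp [hc]
            · by_cases h : j < a
              · rw [if_pos h, if_pos (show j < a + 1 by omega)]
              · rw [if_neg h, if_neg (show ¬ j < a + 1 by omega)]
          · unfold mixD
            refine List.map_congr_left ?_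
            intro j hj
            rcases eq_or_ne j a with rfl | hne
            · simp [hc]
            · by_cases h : j < a
              · rw [if_pos h, if_pos (show j < a + 1 by omega)]
              · rw [if_neg h, if_neg (show ¬ j < a + 1 by omega)]
      rw [hstep]
      exact ih (a + 1) (by omega)
  have h0X : mixX d0 n t 0 = Xl d0 n t := by
    unfold mixX Xl
    refine List.map_congr_left ?_
    intro j hj
    rw [if_neg (by omega)]
  have h0D : mixD d0 n t 0 = Dl d0 n t := by
    unfold mixD Dl
    refine List.map_congr_left ?_
    intro j hj
    rw [if_neg (by omega)]
  rw [← h0X, ← h0D]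
  exact key n 0 (by omega)

def cterm (d0 : PySem.Dict Int Int) (t : Nat) : Int :=
  if d0.contains (t : Int) = true ∧ xf (d0.getD (t : Int) 0) t = 0
  then (t : Int) * d0.getD (t : Int) 0 else 0

def Gd (d0 : PySem.Dict Int Int) (k : Int) : Int :=
  if 0 < k ∧ 2 ≤ d0.getD k 0 ∧ PySem.Int.mod k (2 * (d0.getD k 0 - 1)) = 0
  then k * d0.getD k 0 else 0

theorem cterm_eq (d0 : PySem.Dict Int Int) (t : Nat) :
    cterm d0 t = if d0.contains (t : Int) = true then Gd d0 (t : Int) else 0 := by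
  by_cases hc : d0.contains (t : Int) = true
  · simp only [cterm, Gd, hc, true_and, if_pos]
    exact contrib_eq (d0.getD (t : Int) 0) t
  · simp [cterm, hc]

theorem outer_closed (d0 : PySem.Dict Int Int) (m : Int) (n : Nat)
    (hn : (m + 1).toNat = n) :
    ∀ (k a : Nat), a + k = n →
    (List.range' a k).foldl (fun s (j : Nat) => outerA d0 m s (j : Int))
      (Xl d0 n a, Dl d0 n a, ((List.range a).map (cterm d0)).sum)
    = (Xl d0 n n, Dl d0 n n, ((List.range n).map (cterm d0)).sum) := by
  intro k
  induction k with
  | zero =>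
    intro a ha
    have : a = n := by omega
    subst this
    simp [List.range'_zero]
  | succ k ih =>
    intro a ha
    have haN : a < n := by omega
    rw [List.range'_succ, List.foldl_cons]
    have hstep : outerA d0 m (Xl d0 n a, Dl d0 n a, ((List.range a).map (cterm d0)).sum) (a : Int)
        = (Xl d0 n (a + 1), Dl d0 n (a + 1), ((List.range (a + 1)).map (cterm d0)).sum) := by
      unfold outerA
      have hget : (Xl d0 n a).getD ((a : Int)).toNat 0 =
          (if d0.contains (a : Int) = true then xf (d0.getD (a : Int) 0) a else 0) := by
        have hl : a < (Xl d0 n a).length := by simp [Xl]; omega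
        rw [Int.toNat_natCast, List.getD_eq_getElem _ _ hl]
        simp [Xl]
      have hans : (if (Xl d0 n a).getD ((a : Int)).toNat 0 = 0 ∧ d0.contains (a : Int) = true
          then ((List.range a).map (cterm d0)).sum + (a : Int) * d0.getD (a : Int) 0
          else ((List.range a).map (cterm d0)).sum)
          = ((List.range (a + 1)).map (cterm d0)).sum := by
        rw [List.range_succ, List.map_append, List.sum_append, hget]
        simp only [List.map_cons, List.map_nil, List.sum_cons, List.sum_nil, add_zero]
        by_cases hc : d0.contains (a : Int) = true
        · by_cases hx : xf (d0.getD (a : Int) 0) a = 0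
          · rw [if_pos ⟨by rw [if_pos hc]; exact hx, hc⟩, cterm]
            rw [if_pos ⟨hc, hx⟩]
          · rw [if_neg (by rw [if_pos hc]; exact fun h => hx h.1), cterm,
              if_neg (fun h => hx h.2), add_zero]
        · rw [if_neg (fun h => hc h.2), cterm, if_neg (fun h => hc h.1), add_zero]
      show (_, _, _) = _
      rw [hans]
      have hin := innerA_closed d0 m n a hn
      simp only [hin]
    rw [hstep]
    exact ih (a + 1) (by omega)

theorem sum_indicator (g : Int → Int) (v : Int) :
    ∀ (K : List Int), K.Nodup →
    (K.map (fun k => if k = v then g k else 0)).sum = if v ∈ K then g v else 0 := by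
  intro K
  induction K with
  | nil => simp
  | cons a K ih =>
    intro hnd
    rw [List.nodup_cons] at hnd
    simp only [List.map_cons, List.sum_cons]
    by_cases hav : a = v
    · subst hav
      rw [if_pos rfl, if_pos List.mem_cons_self]
      have hz : (K.map (fun k => if k = a then g k else 0)).sum = 0 := by
        rw [List.map_congr_left (fun k hk => if_neg (fun h : k = a => hnd.1 (h ▸ hk)))]
        simp
      rw [hz, add_zero]
    · rw [if_neg hav, ih hnd.2, zero_add]
      by_cases hv : v ∈ K
      · rw [if_pos hv, if_pos (List.mem_cons_of_mem _ hv)]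
      · rw [if_neg hv, if_neg (fun hmem =>
          (List.mem_cons.mp hmem).elim (fun h => hav h.symm) hv)]

theorem sum_range_mem (K : List Int) (hK : K.Nodup) (g : Int → Int) :
    ∀ (N : Nat),
    ((List.range N).map (fun (t : Nat) => if (t : Int) ∈ K then g (t : Int) else 0)).sum
    = (K.map (fun k => if 0 ≤ k ∧ k < (N : Int) then g k else 0)).sum := by
  intro N
  induction N with
  | zero =>
    simp only [List.range_zero, List.map_nil, List.sum_nil, Nat.cast_zero]
    rw [List.map_congr_left (fun k _ => if_neg (fun h => by omega))]
    simp
  | succ N ih =>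
    rw [List.range_succ, List.map_append, List.sum_append, ih]
    simp only [List.map_cons, List.map_nil, List.sum_cons, List.sum_nil, add_zero]
    have hsplit : ∀ k ∈ K, (fun k => if 0 ≤ k ∧ k < ((N + 1 : Nat) : Int) then g k else 0) k
        = (fun k => (if 0 ≤ k ∧ k < (N : Int) then g k else 0) +
            (if k = (N : Int) then g k else 0)) k := by
      intro k _
      simp only [Nat.cast_add, Nat.cast_one]
      split_ifs with h1 h2 h3 h2 h3 h3 <;> first
        | (exfalso; omega)
        | simp
    rw [List.map_congr_left hsplit, PySem.List.sum_map_add_int,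
      sum_indicator g (N : Int) K hK]

theorem mem_keys_ofList (ps : List (Int × Int)) (k : Int) :
    k ∈ (PySem.Dict.ofList ps).keys ↔ k ∈ ps.map Prod.fst := by
  have h : (PySem.Dict.ofList ps).keys =
      PySem.Set.update (PySem.Dict.empty : PySem.Dict Int Int).keys (ps.map Prod.fst) :=
    PySem.Dict.keys_foldl_insert_key ps Prod.fst (fun _ p => p.2) PySem.Dict.empty
  rw [h, PySem.Dict.keys_empty, PySem.Set.update_nil_left, PySem.Set.mem_ofList]

theorem walk1_main (layers : List (Int × Int)) (hpre : layers ≠ []) :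
    walk1 layers = walk1_alt layers := by
  obtain ⟨p, rest, rfl⟩ : ∃ p rest, layers = p :: rest := by
    cases layers with
    | nil => exact absurd rfl hpre
    | cons p rest => exact ⟨p, rest, rfl⟩
  have hk0 : p.1 ∈ (PySem.Dict.ofList (p :: rest)).keys :=
    (mem_keys_ofList _ _).mpr (by simp)
  have hK : (PySem.Dict.ofList (p :: rest)).keys.Nodup :=
    PySem.Dict.nodup_keys_ofList _
  cases hm : PySem.List.max? (PySem.Dict.ofList (p :: rest)).keys (fun k => k) with
  | none =>
    rw [(PySem.List.max?_eq_none_iff _ _).mp hm] at hk0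
    exact absurd hk0 (List.not_mem_nil)
  | some m =>
    have hub : ∀ k ∈ (PySem.Dict.ofList (p :: rest)).keys, k ≤ m :=
      fun k hk => PySem.List.max?_isMax hm k hk
    set d0 := PySem.Dict.ofList (p :: rest) with hd0
    set n := (m + 1).toNat with hn
    have hlhs : walk1 (p :: rest) = ((List.range n).map (cterm d0)).sum := by
      simp only [walk1]
      rw [← hd0, hm]
      dsimp only
      rw [pyRange_toNat, ← hn, List.foldl_map, List.range_eq_range']
      have hinit0 : List.replicate n (0 : Int) = Xl d0 n 0 := by
        unfold Xl
        apply List.ext_getElem (by simp)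
        intro i h1 h2
        simp [xf_zero]
      have hinit1 : List.replicate n (1 : Int) = Dl d0 n 0 := by
        unfold Dl
        apply List.ext_getElem (by simp)
        intro i h1 h2
        simp [df_zero]
      rw [hinit0, hinit1,
        show (0 : Int) = ((List.range 0).map (cterm d0)).sum by simp,
        outer_closed d0 m n hn.symm n 0 (by omega), ← List.range_eq_range']
    rw [hlhs]
    unfold walk1_alt
    rw [← hd0, PySem.Dict.items_eq_map_keys d0 hK 0, List.map_map]
    have h1 : ((List.range n).map (cterm d0)).sum
        = ((List.range n).map (fun (t : Nat) => if (t : Int) ∈ d0.keys then Gd d0 (t : Int) else 0)).sum := by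
      congr 1
      refine List.map_congr_left (fun t _ => ?_)
      rw [cterm_eq]
      by_cases h : (t : Int) ∈ d0.keys
      · rw [if_pos ((PySem.Dict.contains_iff_mem_keys d0 (t : Int)).mpr h), if_pos h]
      · rw [if_neg (fun hc => h ((PySem.Dict.contains_iff_mem_keys d0 (t : Int)).mp hc)),
          if_neg h]
    rw [h1, sum_range_mem d0.keys hK (Gd d0) n]
    congr 1
    refine List.map_congr_left (fun k hk => ?_)
    have hkm := hub k hk
    have hnm : (m + 1 : Int) ≤ (n : Int) := by omega
    by_cases h0 : 0 ≤ k
    · rw [if_pos ⟨h0, by omega⟩]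
      rfl
    · rw [if_neg (fun h => h0 h.1)]
      show (0 : Int) = if 0 < k ∧ _ ∧ _ then _ else _
      rw [if_neg (fun h => h0 (le_of_lt h.1))]

-- ===== VERDICT (by name: the statement is the Claim_ definition above) =====
theorem walk1_spec : Claim_equal_walk1 := by
  intro layers _ hpre
  unfold Spec_walk1
  exact walk1_main layers hpre
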